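-- pv_equiv track=rewrite | github.com/bighousevn/Rag_Graph_LawLaw | triplet_extractor_vi.py | is_descendant
-- ===== SOURCE A (Python) =====
-- from typing import Any, Dict, List, Optional, Sequence
--
-- def is_descendant(node_idx: int, ancestor_idx: int, head: List[int]) -> bool:
--     current = node_idx
--     seen = set()
--     while 1 <= current <= len(head):
--         parent = head[current - 1]
--         if parent == 0:
--             return False
--         if parent == ancestor_idx:
--             return True
--         if parent in seen:
--             return False
--         seen.add(parent)
--         current = parent
--     return False
-- ===== SOURCE B (Python) =====
-- def is_descendant(node_idx: int, ancestor_idx: int, head):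
--     # Bottom-up closure: mark every node whose parent chain reaches ancestor_idx,
--     # by iterating the "parent is ancestor, or parent is already marked" rule to a
--     # fixed point (n rounds suffice: a shortest witness chain has distinct nodes;
--     # we stop early as soon as a round adds no new mark).
--     if ancestor_idx == 0:
--         return False  # 0 is the root sentinel, nothing descends from it
--     n = len(head)
--     desc = [False] * n
--     for _ in range(n):
--         changed = False
--         for i in range(1, n + 1):
--             p = head[i - 1]
--             if (p == ancestor_idx or (1 <= p <= n and desc[p - 1])) and not desc[i - 1]:
--                 desc[i - 1] = True
--                 changed = True
--         if not changed:
--             break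
--     return 1 <= node_idx <= n and desc[node_idx - 1]
-- ===== Notes on version B (the rewrite author's own statement) =====
-- stated objective: alternative
-- what changed: Replaces A's forward parent-pointer walk with a seen-set by a bottom-up fixed-point closure: B repeatedly marks every node whose parent is the ancestor or already marked (at most len(head) rounds, stopping early once a round adds no mark), then tests node_idx against the marking; no walk and no cycle detection are needed.
import Mathlib
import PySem

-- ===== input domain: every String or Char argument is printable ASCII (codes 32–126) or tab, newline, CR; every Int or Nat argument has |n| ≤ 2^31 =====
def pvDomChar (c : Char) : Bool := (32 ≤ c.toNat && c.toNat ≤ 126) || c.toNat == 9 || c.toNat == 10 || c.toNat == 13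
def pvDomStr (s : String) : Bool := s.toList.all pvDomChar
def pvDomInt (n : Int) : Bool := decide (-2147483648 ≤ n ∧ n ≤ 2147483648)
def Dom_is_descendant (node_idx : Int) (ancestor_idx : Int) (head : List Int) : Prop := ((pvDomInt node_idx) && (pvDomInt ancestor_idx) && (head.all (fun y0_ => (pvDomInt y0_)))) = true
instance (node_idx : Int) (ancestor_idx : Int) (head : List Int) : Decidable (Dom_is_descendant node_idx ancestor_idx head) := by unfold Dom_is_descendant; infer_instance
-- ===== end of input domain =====

-- B replaces A's forward parent-pointer walk (with a seen-set) by a bottom-up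
-- fixed-point closure over the whole node set (objective: alternative algorithm).

-- ===== PORT A =====
-- A's while-loop with its `seen` set. Fuel (head.length + 2) is a totality guard only:
-- every continuing iteration adds a fresh in-range parent to `seen`, so Python's loop
-- makes at most head.length + 1 guard checks and the fuel is never exhausted.
def isDescAux (ancestor_idx : Int) (head : List Int) : Nat → Int → PySem.Set Int → Bool
  | 0, _, _ => false
  | f + 1, current, seen =>
      if 1 ≤ current ∧ current ≤ (head.length : Int) then
        -- head[current-1]: index proven in range by the guard, so getD 0 is exact
        let parent := (PySem.List.pyGet? head (current - 1)).getD 0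
        if parent = 0 then false
        else if parent = ancestor_idx then true
        else if PySem.Set.contains seen parent then false
        else isDescAux ancestor_idx head f parent (PySem.Set.add seen parent)
      else false

def is_descendant (node_idx : Int) (ancestor_idx : Int) (head : List Int) : Bool :=
  isDescAux ancestor_idx head (head.length + 2) node_idx PySem.Set.empty

-- ===== PORT B =====
-- one saturation round: for i in range(1, n+1): if head[i-1] == a or (in-range parent
-- already marked): desc[i-1] = True   (head[i-1] read under the 1 ≤ i ≤ n guard, so getD is exact)
-- the loop body: p = head[i-1]; if p == a or (1 <= p <= n and desc[p-1]): desc[i-1] = True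
def descStep (a : Int) (head : List Int) (d : List Bool) (i : Int) : List Bool :=
  if (PySem.List.pyGet? head (i - 1)).getD 0 = a ∨
     (1 ≤ (PySem.List.pyGet? head (i - 1)).getD 0 ∧
      (PySem.List.pyGet? head (i - 1)).getD 0 ≤ (head.length : Int) ∧
      d.getD ((PySem.List.pyGet? head (i - 1)).getD 0 - 1).toNat false = true)
  then d.set (i - 1).toNat true else d

def descRound (a : Int) (head : List Int) (desc : List Bool) : List Bool :=
  (PySem.List.pyRange 1 ((head.length : Int) + 1) 1).foldl (descStep a head) desc

-- for _ in range(n): one round each, with B's early exit `if not changed: break`.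
-- Marks only grow, so Python's `changed` flag is false exactly when the round
-- returned its input unchanged.
def descRoundsE (a : Int) (head : List Int) : Nat → List Bool → List Bool
  | 0, d => d
  | k + 1, d =>
      if descRound a head d = d then d
      else descRoundsE a head k (descRound a head d)

def is_descendant_alt (node_idx : Int) (ancestor_idx : Int) (head : List Int) : Bool :=
  if ancestor_idx = 0 then false
  else
    let desc := descRoundsE ancestor_idx head head.length (List.replicate head.length false)
    decide (1 ≤ node_idx ∧ node_idx ≤ (head.length : Int)) &&
      desc.getD (node_idx - 1).toNat false

-- ===== PRECONDITION & SPEC =====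
def Spec_is_descendant (node_idx : Int) (ancestor_idx : Int) (head : List Int) (out : Bool) : Prop := out = is_descendant_alt node_idx ancestor_idx head
instance (node_idx : Int) (ancestor_idx : Int) (head : List Int) (out : Bool) : Decidable (Spec_is_descendant node_idx ancestor_idx head out) := by unfold Spec_is_descendant; infer_instance

-- ===== CLAIM (what is proved, stated in full; the proofs are below) =====
def Claim_equal_is_descendant : Prop := ∀ (node_idx : Int) (ancestor_idx : Int) (head : List Int), Dom_is_descendant node_idx ancestor_idx head → Spec_is_descendant node_idx ancestor_idx head (is_descendant node_idx ancestor_idx head)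

-- ===== LEMMAS AND PROOFS =====

-- the rounds without the early exit: easier to induct on (equal to descRoundsE below)
def descRounds (a : Int) (head : List Int) : Nat → List Bool → List Bool
  | 0, d => d
  | k + 1, d => descRounds a head k (descRound a head d)

-- the parent of x (total form of head[x-1]; exact when 1 ≤ x ≤ len(head))
def pvNext (head : List Int) (x : Int) : Int := (PySem.List.pyGet? head (x - 1)).getD 0

-- 1 ≤ x ≤ len(head)
def pvInR (head : List Int) (x : Int) : Prop := 1 ≤ x ∧ x ≤ (head.length : Int)

-- "the parent chain from x hits a after exactly m steps, staying in range until then"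
def pvHits (a : Int) (head : List Int) (x : Int) (m : Nat) : Prop :=
  (∀ j < m, pvInR head ((pvNext head)^[j] x)) ∧ (pvNext head)^[m] x = a

-- x's parent chain reaches a (A returns True from x; B marks x)
inductive Reach (a : Int) (head : List Int) : Int → Prop
  | base (x : Int) (h : pvInR head x) (he : pvNext head x = a) : Reach a head x
  | step (x : Int) (h : pvInR head x) (hr : Reach a head (pvNext head x)) : Reach a head x

theorem reach_iff_hits (a : Int) (head : List Int) (x : Int) :
    Reach a head x ↔ ∃ m, 1 ≤ m ∧ pvHits a head x m := by
  constructor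
  · intro h
    induction h with
    | base x h he =>
        exact ⟨1, le_refl 1, fun j hj => by simpa [show j = 0 by omega] using h, by simpa using he⟩
    | step x h hr ih =>
        obtain ⟨m, hm, h1, h2⟩ := ih
        refine ⟨m + 1, by omega, ?_, ?_⟩
        · intro j hj
          cases j with
          | zero => simpa using h
          | succ j => simpa [Function.iterate_succ_apply] using h1 j (by omega)
        · simpa [Function.iterate_succ_apply] using h2
  · rintro ⟨m, hm, hh⟩
    induction m generalizing x with
    | zero => omega
    | succ m ih =>
        obtain ⟨h1, h2⟩ := hh
        cases Nat.eq_zero_or_pos m with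
        | inl h0 =>
            subst h0
            exact Reach.base x (by simpa using h1 0 (by omega)) (by simpa using h2)
        | inr hpos =>
            refine Reach.step x (by simpa using h1 0 (by omega)) (ih (pvNext head x) hpos ⟨?_, ?_⟩)
            · intro j hj
              have := h1 (j + 1) (by omega)
              rwa [Function.iterate_succ_apply] at this
            · rwa [Function.iterate_succ_apply] at h2

-- splice out a repeated value in the chain
theorem hits_splice (a : Int) (head : List Int) (x : Int) (m i j : Nat)
    (hh : pvHits a head x m) (hij : i < j) (hjm : j ≤ m)
    (heq : (pvNext head)^[i] x = (pvNext head)^[j] x) :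
    pvHits a head x (m - j + i) := by
  obtain ⟨h1, h2⟩ := hh
  have key : ∀ s : Nat, (pvNext head)^[s + i] x = (pvNext head)^[s + j] x := by
    intro s
    rw [Function.iterate_add_apply, Function.iterate_add_apply, heq]
  constructor
  · intro t ht
    by_cases hti : t ≤ i
    · exact h1 t (by omega)
    · have : (pvNext head)^[t] x = (pvNext head)^[(t - i) + j] x := by
        rw [← key (t - i), Nat.sub_add_cancel (by omega)]
      rw [this]
      exact h1 _ (by omega)
  · have : (pvNext head)^[m - j + i] x = (pvNext head)^[m] x := by
      rw [key (m - j), Nat.sub_add_cancel hjm]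
    rw [this, h2]

-- any hit can be shortened below a repeat, so a MINIMAL hit has a chain of distinct
-- in-range currents: pigeonhole gives m ≤ len(head)
theorem minimal_hits_le (a : Int) (head : List Int) (x : Int) (m : Nat)
    (hh : pvHits a head x m) (h1 : 1 ≤ m)
    (hmin : ∀ m', 1 ≤ m' → pvHits a head x m' → m ≤ m') :
    m ≤ head.length := by
  by_contra hgt
  push_neg at hgt
  have hmap : ∀ c ∈ Finset.range m, (pvNext head)^[c] x ∈ Finset.Icc (1 : Int) (head.length : Int) := by
    intro c hc
    obtain ⟨hl, hr⟩ := hh.1 c (Finset.mem_range.mp hc)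
    exact Finset.mem_Icc.mpr ⟨hl, hr⟩
  have hcard : (Finset.Icc (1 : Int) (head.length : Int)).card < (Finset.range m).card := by
    rw [Int.card_Icc, Finset.card_range]
    omega
  obtain ⟨i, hi, j, hj, hne, heq⟩ :=
    Finset.exists_ne_map_eq_of_card_lt_of_maps_to hcard hmap
  rw [Finset.mem_range] at hi hj
  -- wlog i < j
  rcases lt_or_gt_of_ne hne with hlt | hlt
  · have h' := hits_splice a head x m i j hh hlt (by omega) heq
    have := hmin (m - j + i) (by omega) h'
    omega
  · have h' := hits_splice a head x m j i hh hlt (by omega) heq.symm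
    have := hmin (m - i + j) (by omega) h'
    omega

-- distinctness of the PARENTS (positions 1..m) of a minimal hit
theorem minimal_hits_inj (a : Int) (head : List Int) (x : Int) (m : Nat)
    (hh : pvHits a head x m)
    (hmin : ∀ m', 1 ≤ m' → pvHits a head x m' → m ≤ m') :
    ∀ i j, 1 ≤ i → i < j → j ≤ m → (pvNext head)^[i] x ≠ (pvNext head)^[j] x := by
  intro i j hi hij hjm heq
  have h' := hits_splice a head x m i j hh hij hjm heq
  have := hmin (m - j + i) (by omega) h'
  omega

-- ===== A-side characterisation =====

-- ancestor 0: the `parent == 0` test fires first, so A can never return True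
theorem isDescAux_zero (head : List Int) :
    ∀ (f : Nat) (c : Int) (s : PySem.Set Int), isDescAux 0 head f c s = false := by
  intro f
  induction f with
  | zero => intro c s; rfl
  | succ f ih =>
      intro c s
      simp only [isDescAux]
      split
      · split
        · rfl
        · split
          · rfl
          · exact ih _ _
      · rfl

-- soundness: whenever A's walk answers True, the start reaches the ancestor
theorem isDescAux_reach (a : Int) (head : List Int) :
    ∀ (f : Nat) (c : Int) (s : PySem.Set Int),
      isDescAux a head f c s = true → Reach a head c := by
  intro f
  induction f with
  | zero => intro c s h; simp [isDescAux] at h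
  | succ f ih =>
      intro c s h
      simp only [isDescAux] at h
      by_cases hg : 1 ≤ c ∧ c ≤ (head.length : Int)
      · rw [if_pos hg] at h
        by_cases h0 : (PySem.List.pyGet? head (c - 1)).getD 0 = 0
        · simp [h0] at h
        · rw [if_neg h0] at h
          by_cases ha : (PySem.List.pyGet? head (c - 1)).getD 0 = a
          · exact Reach.base c hg ha
          · rw [if_neg ha] at h
            by_cases hs : PySem.Set.contains s ((PySem.List.pyGet? head (c - 1)).getD 0) = true
            · rw [if_pos hs] at h
              exact absurd h (by simp)
            · rw [if_neg hs] at h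
              exact Reach.step c hg (ih _ _ h)
      · rw [if_neg hg] at h; exact absurd h (by simp)

-- completeness: along a minimal chain whose parents are fresh for `seen`, A answers True
theorem isDescAux_true (a : Int) (head : List Int) (ha : a ≠ 0) :
    ∀ (m : Nat) (x : Int) (s : PySem.Set Int) (f : Nat),
      1 ≤ m → pvHits a head x m →
      (∀ j, 1 ≤ j → j ≤ m → (pvNext head)^[j] x ∉ s) →
      (∀ i j, 1 ≤ i → i < j → j ≤ m → (pvNext head)^[i] x ≠ (pvNext head)^[j] x) →
      m ≤ f → isDescAux a head f x s = true := by
  intro m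
  induction m with
  | zero => omega
  | succ m ih =>
      intro x s f h1 hh hfresh hinj hf
      obtain ⟨f', rfl⟩ : ∃ f', f = f' + 1 := ⟨f - 1, by omega⟩
      have hg : 1 ≤ x ∧ x ≤ (head.length : Int) := by
        have := hh.1 0 (by omega); simpa [pvInR] using this
      simp only [isDescAux, if_pos hg]
      have hpx : (PySem.List.pyGet? head (x - 1)).getD 0 = pvNext head x := rfl
      by_cases hba : pvNext head x = a
      · rw [hpx, if_neg (by rw [hba]; exact ha), if_pos hba]
      · -- the chain needs at least two steps
        have hm1 : 1 ≤ m := by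
          rcases Nat.eq_zero_or_pos m with h0 | h0
          · exfalso; apply hba; have := hh.2; simpa [h0] using this
          · exact h0
        have hinr : pvInR head (pvNext head x) := by
          have := hh.1 1 (by omega); simpa using this
        have h0 : pvNext head x ≠ 0 := by
          obtain ⟨hl, _⟩ := hinr; omega
        rw [hpx, if_neg h0, if_neg hba]
        have hcont : ¬ (PySem.Set.contains s (pvNext head x) = true) := by
          intro hc
          have hmem : pvNext head x ∈ s := (PySem.Set.contains_iff s _).mp hc
          have := hfresh 1 (by omega) (by omega)
          rw [Function.iterate_one] at this
          exact this hmem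
        rw [if_neg hcont]
        apply ih (pvNext head x) (PySem.Set.add s (pvNext head x)) f' hm1
        · constructor
          · intro j hj
            have := hh.1 (j + 1) (by omega)
            rwa [Function.iterate_succ_apply] at this
          · have := hh.2
            rwa [Function.iterate_succ_apply] at this
        · intro j hj hjm hmem
          rw [← Function.iterate_succ_apply] at hmem
          rw [PySem.Set.mem_add] at hmem
          rcases hmem with hmem | hmem
          · exact hfresh (j + 1) (by omega) (by omega) hmem
          · refine hinj 1 (j + 1) (by omega) (by omega) (by omega) ?_
            rw [Function.iterate_one]
            exact hmem.symm
        · intro i j hi hij hjm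
          have := hinj (i + 1) (j + 1) (by omega) (by omega) (by omega)
          rwa [Function.iterate_succ_apply, Function.iterate_succ_apply] at this
        · omega

-- A = true ↔ Reach, for a ≠ 0
theorem isDesc_iff_reach (node a : Int) (head : List Int) (ha : a ≠ 0) :
    is_descendant node a head = true ↔ Reach a head node := by
  constructor
  · exact isDescAux_reach a head _ _ _
  · intro hr
    obtain ⟨m0, hm0, hh0⟩ := (reach_iff_hits a head node).mp hr
    haveI : DecidablePred (fun m => 1 ≤ m ∧ pvHits a head node m) := fun m => by
      unfold pvHits pvInR; infer_instance
    have hex : ∃ m, 1 ≤ m ∧ pvHits a head node m := ⟨m0, hm0, hh0⟩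
    set m := Nat.find hex with hm
    obtain ⟨h1, hh⟩ := Nat.find_spec hex
    have hmin : ∀ m', 1 ≤ m' → pvHits a head node m' → m ≤ m' := by
      intro m' h1' hh'
      exact Nat.find_le ⟨h1', hh'⟩
    have hle := minimal_hits_le a head node m hh h1 hmin
    exact isDescAux_true a head ha m node PySem.Set.empty (head.length + 2) h1 hh
      (by intro j _ _ h; simpa [PySem.Set.empty] using h)
      (minimal_hits_inj a head node m hh hmin) (by omega)

-- ===== B-side characterisation =====

-- a round (and hence any fold step) preserves length
theorem descRound_length (a : Int) (head : List Int) (d : List Bool) :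
    (descRound a head d).length = d.length := by
  unfold descRound
  generalize PySem.List.pyRange 1 ((head.length : Int) + 1) 1 = l
  induction l generalizing d with
  | nil => rfl
  | cons i l ihl =>
      simp only [List.foldl_cons]
      rw [ihl]
      unfold descStep
      split
      · exact List.length_set ..
      · rfl

theorem descRounds_length (a : Int) (head : List Int) (k : Nat) (d : List Bool) :
    (descRounds a head k d).length = d.length := by
  induction k generalizing d with
  | zero => rfl
  | succ k ih => rw [descRounds, ih, descRound_length]

-- rounds commute: the iterate can be peeled from either end
theorem descRounds_comm (a : Int) (head : List Int) (k : Nat) (d : List Bool) :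
    descRounds a head k (descRound a head d) = descRound a head (descRounds a head k d) := by
  induction k generalizing d with
  | zero => rfl
  | succ k ih => rw [descRounds, descRounds, ih]

-- a round marks x whenever x's parent is the ancestor or already marked
theorem descRound_hits (a : Int) (head : List Int) (d : List Bool)
    (hlen : d.length = head.length) (x : Int) (hx : pvInR head x)
    (hc : pvNext head x = a ∨ (pvInR head (pvNext head x) ∧
          d.getD ((pvNext head x) - 1).toNat false = true)) :
    (descRound a head d).getD (x - 1).toNat false = true := by
  obtain ⟨hx1, hx2⟩ := hx
  have hmem : x ∈ PySem.List.pyRange 1 ((head.length : Int) + 1) 1 := by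
    rw [PySem.List.mem_pyRange_one]; omega
  obtain ⟨l₁, l₂, hsplit⟩ := List.append_of_mem hmem
  unfold descRound
  rw [hsplit, List.foldl_append, List.foldl_cons]
  -- after the prefix, the state d₁ still satisfies the trigger (marks only grow)
  have hmono : ∀ (l : List Int) (d' : List Bool) (j : Nat), d'.getD j false = true →
      (l.foldl (descStep a head) d').getD j false = true := by
    intro l
    induction l with
    | nil => intro d' j h; exact h
    | cons i l ihl =>
        intro d' j h
        simp only [List.foldl_cons]
        apply ihl
        unfold descStep
        split
        · rcases eq_or_ne (i - 1).toNat j with rfl | hne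
          · rw [List.getD_eq_getElem?_getD, List.getElem?_set_self']
            rw [List.getD_eq_getElem?_getD] at h
            cases hj : d'[(i - 1).toNat]? with
            | none => rw [hj] at h; simp at h
            | some b => simp [hj]
          · rw [List.getD_eq_getElem?_getD, List.getElem?_set_ne hne,
              ← List.getD_eq_getElem?_getD]; exact h
        · exact h
  have hlen1 : ∀ (l : List Int) (d' : List Bool), (l.foldl (descStep a head) d').length = d'.length := by
    intro l
    induction l with
    | nil => intro d'; rfl
    | cons i l ihl =>
        intro d'
        simp only [List.foldl_cons]
        rw [ihl]
        unfold descStep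
        split
        · exact List.length_set ..
        · rfl
  set d₁ := l₁.foldl (descStep a head) d with hd₁
  have hc₁ : (PySem.List.pyGet? head (x - 1)).getD 0 = a ∨
      (1 ≤ (PySem.List.pyGet? head (x - 1)).getD 0 ∧
       (PySem.List.pyGet? head (x - 1)).getD 0 ≤ (head.length : Int) ∧
       d₁.getD ((PySem.List.pyGet? head (x - 1)).getD 0 - 1).toNat false = true) := by
    rcases hc with h | ⟨⟨hp1, hp2⟩, hmark⟩
    · exact Or.inl h
    · exact Or.inr ⟨hp1, hp2, hmono l₁ d _ hmark⟩
  have hstep : descStep a head d₁ x = d₁.set (x - 1).toNat true := by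
    unfold descStep; exact if_pos hc₁
  rw [hstep]
  apply hmono
  have hidx : (x - 1).toNat < d₁.length := by
    rw [hd₁, hlen1, hlen]; omega
  rw [List.getD_eq_getElem?_getD, List.getElem?_set_self', List.getElem?_eq_getElem hidx]
  simp

-- completeness: a chain of length m ≤ k is marked after k rounds
theorem descRounds_complete (a : Int) (head : List Int) :
    ∀ (k : Nat) (d : List Bool), d.length = head.length →
      ∀ (x : Int) (m : Nat), 1 ≤ m → m ≤ k → pvHits a head x m →
      (descRounds a head k d).getD (x - 1).toNat false = true := by
  intro k
  induction k with
  | zero => omega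
  | succ k ih =>
      intro d hlen x m h1 hk hh
      have hx : pvInR head x := by simpa using hh.1 0 (by omega)
      by_cases hmk : m ≤ k
      · exact ih (descRound a head d) (by rw [descRound_length, hlen]) x m h1 hmk hh
      · -- m = k + 1: the first k rounds mark the parent, the last round marks x
        rw [descRounds, descRounds_comm]
        apply descRound_hits a head _ (by rw [descRounds_length, hlen]) x hx
        rcases Nat.eq_zero_or_pos (m - 1) with h0 | hpos
        · left
          have := hh.2
          simpa [show m = 1 by omega] using this
        · right
          have hm : m = k + 1 := by omega
          have hinr : pvInR head (pvNext head x) := by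
            simpa using hh.1 1 (by omega)
          refine ⟨hinr, ih d hlen (pvNext head x) (m - 1) hpos (by omega) ⟨?_, ?_⟩⟩
          · intro j hj
            have := hh.1 (j + 1) (by omega)
            rwa [Function.iterate_succ_apply] at this
          · have := hh.2
            rw [show m = (m - 1) + 1 by omega, Function.iterate_succ_apply] at this
            exact this
  
-- soundness: every marked node reaches the ancestor
theorem descRound_sound (a : Int) (head : List Int) (d : List Bool)
    (hgood : ∀ j : Nat, j < head.length → d.getD j false = true → Reach a head ((j : Int) + 1)) :
    ∀ j : Nat, j < head.length → (descRound a head d).getD j false = true →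
      Reach a head ((j : Int) + 1) := by
  unfold descRound
  have hall : ∀ i ∈ PySem.List.pyRange 1 ((head.length : Int) + 1) 1, pvInR head i := by
    intro i hi
    rw [PySem.List.mem_pyRange_one] at hi
    exact ⟨hi.1, by omega⟩
  generalize hgen : PySem.List.pyRange 1 ((head.length : Int) + 1) 1 = l
  rw [hgen] at hall
  clear hgen
  induction l generalizing d with
  | nil => exact hgood
  | cons i l ihl =>
      simp only [List.foldl_cons]
      have hi : pvInR head i := hall i List.mem_cons_self
      apply ihl
      · intro j hj htrue
        unfold descStep at htrue
        split at htrue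
        · next hcond =>
            rcases eq_or_ne (i - 1).toNat j with heq | hne
            · -- the freshly set entry: j + 1 = i, and the trigger proves Reach i
              obtain ⟨hi1, hi2⟩ := hi
              have hji : (j : Int) + 1 = i := by omega
              rw [hji]
              have hpdef : pvNext head i = (PySem.List.pyGet? head (i - 1)).getD 0 := rfl
              rcases hcond with h | ⟨hp1, hp2, hmark⟩
              · exact Reach.base i ⟨hi1, hi2⟩ (by rw [hpdef]; exact h)
              · rw [← hpdef] at hp1 hp2 hmark
                have hr := hgood ((pvNext head i) - 1).toNat (by omega) hmark
                have hpidx : (((pvNext head i - 1).toNat : Int)) + 1 = pvNext head i := by omega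
                rw [hpidx] at hr
                exact Reach.step i ⟨hi1, hi2⟩ hr
            · rw [List.getD_eq_getElem?_getD, List.getElem?_set_ne hne,
                ← List.getD_eq_getElem?_getD] at htrue
              exact hgood j hj htrue
        · exact hgood j hj htrue
      · intro i' hi'; exact hall i' (List.mem_cons_of_mem i hi')

theorem descRounds_sound (a : Int) (head : List Int) (k : Nat) :
    ∀ (d : List Bool),
      (∀ j : Nat, j < head.length → d.getD j false = true → Reach a head ((j : Int) + 1)) →
      ∀ j : Nat, j < head.length → (descRounds a head k d).getD j false = true →
        Reach a head ((j : Int) + 1) := by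
  induction k with
  | zero => intro d hgood; exact hgood
  | succ k ih =>
      intro d hgood
      exact ih (descRound a head d) (descRound_sound a head d hgood)

-- a fixed point stays fixed, so the early exit changes nothing
theorem descRounds_fix (a : Int) (head : List Int) (d : List Bool)
    (h : descRound a head d = d) : ∀ k, descRounds a head k d = d := by
  intro k
  induction k with
  | zero => rfl
  | succ k ih => rw [descRounds, h, ih]

theorem descRoundsE_eq (a : Int) (head : List Int) :
    ∀ (k : Nat) (d : List Bool), descRoundsE a head k d = descRounds a head k d := by
  intro k
  induction k with
  | zero => intro d; rfl
  | succ k ih =>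
      intro d
      rw [descRoundsE, descRounds]
      by_cases h : descRound a head d = d
      · rw [if_pos h, h, descRounds_fix a head d h k]
      · rw [if_neg h, ih]

-- B = true ↔ Reach, for a ≠ 0
theorem isDescAlt_iff_reach (node a : Int) (head : List Int) (ha : a ≠ 0) :
    is_descendant_alt node a head = true ↔ Reach a head node := by
  unfold is_descendant_alt
  rw [if_neg ha]
  simp only [descRoundsE_eq, Bool.and_eq_true, decide_eq_true_eq]
  constructor
  · rintro ⟨⟨h1, h2⟩, hmark⟩
    have hidx : (node - 1).toNat < head.length := by omega
    have := descRounds_sound a head head.length (List.replicate head.length false)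
      (by intro j hj h; simp at h) (node - 1).toNat hidx hmark
    have hni : (((node - 1).toNat : Int)) + 1 = node := by omega
    rwa [hni] at this
  · intro hr
    have hx : pvInR head node := by
      cases hr with
      | base _ h _ => exact h
      | step _ h _ => exact h
    obtain ⟨m0, hm0, hh0⟩ := (reach_iff_hits a head node).mp hr
    haveI : DecidablePred (fun m => 1 ≤ m ∧ pvHits a head node m) := fun m => by
      unfold pvHits pvInR; infer_instance
    have hex : ∃ m, 1 ≤ m ∧ pvHits a head node m := ⟨m0, hm0, hh0⟩
    obtain ⟨h1, hh⟩ := Nat.find_spec hex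
    have hmin : ∀ m', 1 ≤ m' → pvHits a head node m' → Nat.find hex ≤ m' := by
      intro m' h1' hh'
      exact Nat.find_le ⟨h1', hh'⟩
    have hle := minimal_hits_le a head node _ hh h1 hmin
    exact ⟨⟨hx.1, hx.2⟩,
      descRounds_complete a head head.length (List.replicate head.length false)
        (by simp) node _ h1 hle hh⟩

-- ===== VERDICT (by name: the statement is the Claim_ definition above) =====
theorem is_descendant_spec : Claim_equal_is_descendant := by
  intro node_idx ancestor_idx head _
  unfold Spec_is_descendant
  by_cases ha : ancestor_idx = 0
  · subst ha
    rw [show is_descendant node_idx 0 head = false from isDescAux_zero head _ _ _]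
    unfold is_descendant_alt
    rw [if_pos rfl]
  · have h := (isDesc_iff_reach node_idx ancestor_idx head ha).trans
      (isDescAlt_iff_reach node_idx ancestor_idx head ha).symm
    exact Bool.coe_iff_coe.mp h
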